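-- pv_equiv track=rewrite | github.com/siddhivinayakdubey/DSA | Topic-Wise/Logical/Python/maximizingTeam.py | maxTeams
-- ===== SOURCE A (Python) =====
-- def canFormTeam(n, m):
--     if (n >= 1 and m >= 2):
--         return True
--     if (m >= 1 and n >= 2):
--         return True
--     return False
--
-- def maxTeams(n, m):
--     count = 0
--     while (canFormTeam(n, m)):
--         if (n > m):
--             n -= 2
--             m -= 1
--         else:
--             m -= 2
--             n -= 1
--         count += 1
--     return count
-- ===== SOURCE B (Python) =====
-- def maxTeams(n, m):
--     return max(0, min(n, m, (n + m) // 3))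
-- ===== Notes on version B (the rewrite author's own statement) =====
-- stated objective: faster
-- what changed: Replaced the greedy decrement loop with the closed form max(0, min(n, m, (n+m)//3)).
import Mathlib
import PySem

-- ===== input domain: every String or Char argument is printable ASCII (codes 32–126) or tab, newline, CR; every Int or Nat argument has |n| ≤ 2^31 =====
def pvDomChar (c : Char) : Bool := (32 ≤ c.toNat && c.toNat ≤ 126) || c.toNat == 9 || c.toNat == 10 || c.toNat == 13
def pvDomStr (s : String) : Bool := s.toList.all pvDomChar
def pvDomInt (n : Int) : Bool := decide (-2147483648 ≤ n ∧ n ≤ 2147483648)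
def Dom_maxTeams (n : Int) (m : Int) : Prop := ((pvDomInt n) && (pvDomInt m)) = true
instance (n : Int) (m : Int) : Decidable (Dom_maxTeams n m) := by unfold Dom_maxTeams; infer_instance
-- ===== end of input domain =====

-- B replaces A's greedy decrement loop by the closed form max(0, min(n, m, (n+m)//3)) (O(1) vs O(n+m)).


-- ===== PORT A =====
def canFormTeam (n : Int) (m : Int) : Bool :=
  if n ≥ 1 ∧ m ≥ 2 then true
  else if m ≥ 1 ∧ n ≥ 2 then true
  else false

-- the while loop of A, as structural recursion on the decreasing measure n+m
def maxTeamsLoop (n : Int) (m : Int) (count : Int) : Int :=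
  if h : canFormTeam n m then
    if n > m then maxTeamsLoop (n - 2) (m - 1) (count + 1)
    else maxTeamsLoop (n - 1) (m - 2) (count + 1)
  else count
termination_by (n + m).toNat
decreasing_by
  · simp [canFormTeam] at h; omega
  · simp [canFormTeam] at h; omega

def maxTeams (n : Int) (m : Int) : Int := maxTeamsLoop n m 0

-- ===== PORT B =====
def maxTeams_alt (n : Int) (m : Int) : Int :=
  max 0 (min n (min m (PySem.Int.floordiv (n + m) 3)))

-- ===== PRECONDITION & SPEC =====
def Spec_maxTeams (n : Int) (m : Int) (out : Int) : Prop := out = maxTeams_alt n m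
instance (n : Int) (m : Int) (out : Int) : Decidable (Spec_maxTeams n m out) := by unfold Spec_maxTeams; infer_instance

-- ===== CLAIM (what is proved, stated in full; the proofs are below) =====
def Claim_equal_maxTeams : Prop := ∀ (n : Int) (m : Int), Dom_maxTeams n m → Spec_maxTeams n m (maxTeams n m)

-- ===== LEMMAS AND PROOFS =====

-- closed form for B, written without floordiv
theorem maxTeams_alt_eq (n m : Int) :
    maxTeams_alt n m = max 0 (min n (min m ((n + m) / 3))) := by
  unfold maxTeams_alt
  rw [PySem.Int.floordiv_eq_ediv_of_pos (by norm_num)]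

-- loop invariant: the loop adds the closed form to the accumulator
theorem maxTeamsLoop_closed (n m count : Int) :
    maxTeamsLoop n m count = count + max 0 (min n (min m ((n + m) / 3))) := by
  by_cases h : canFormTeam n m = true
  · rw [maxTeamsLoop, dif_pos h]
    simp [canFormTeam] at h
    by_cases hnm : n > m
    · rw [if_pos hnm, maxTeamsLoop_closed (n - 2) (m - 1) (count + 1)]
      omega
    · rw [if_neg hnm, maxTeamsLoop_closed (n - 1) (m - 2) (count + 1)]
      omega
  · rw [maxTeamsLoop, dif_neg h]
    simp [canFormTeam] at h
    omega
termination_by (n + m).toNat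
decreasing_by
  · simp [canFormTeam] at h
    rcases h with h | h <;> omega
  · simp [canFormTeam] at h
    rcases h with h | h <;> omega

-- ===== VERDICT (by name: the statement is the Claim_ definition above) =====
theorem maxTeams_spec : Claim_equal_maxTeams := by
  intro n m _
  unfold Spec_maxTeams maxTeams
  rw [maxTeamsLoop_closed, maxTeams_alt_eq]
  omega
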